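-- pv_equiv track=rewrite | github.com/BlueScreenMaker/333_Algorithm | Programmers/위장.py | solution
-- ===== SOURCE A (Python) =====
-- from functools import reduce
--
-- def multiply(arr):
--     return reduce(lambda x, y: x * y, arr)
--
-- def solution(clothes):
--     answer=0
--
--     kind=[]
--     for v in range(0,len(clothes)):
--         if not clothes[v][1] in kind:
--             kind.append(clothes[v][1])
--     # 옷 종류 넣기
--
--     clothes_list=[[] for b in range(0,len(kind))]
--     for z in range(0,len(clothes)):
--         if clothes[z][1] in kind:
--             a=kind.index(clothes[z][1])
--             clothes_list[a].append(clothes[z][0])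
--     # 종류 별로 옷을 분류함
--
--     if len(clothes_list)>1:
--         size_list=[]
--         for h in range(0,len(clothes_list)):
--             size_list.append(len(clothes_list[h])+1)
--         answer+=multiply(size_list)
--         answer-=1
--     # 종류가 1개 이상인 경우,
--     # 각 종류별로 벗을 수 있는 경우의 수를 추가(+1)
--     # 각 종류별로 벗을 수 있는 경우가 생겼으므로 모든 종류의 옷을 입지 않는 경우가 생김 → -1로 해당 경우의 수를 뺌
--
--
--     else:
--         answer+=len(clothes)
--     # 종류가 1개이면 주어진 옷만 입고 벗으면 되므로 이 경우에는 그냥 옷 수만큼의 경우의 수가 생김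
--
--     return answer
-- ===== SOURCE B (Python) =====
-- def solution(clothes):
--     kinds = sorted(item[1] for item in clothes)
--     answer = 1
--     run = 0
--     prev = None
--     for k in kinds:
--         if k == prev:
--             run += 1
--         else:
--             answer *= run + 1
--             run = 1
--             prev = k
--     return answer * (run + 1) - 1
-- ===== Notes on version B (the rewrite author's own statement) =====
-- stated objective: alternative
-- what changed: replaces A's membership-scan kind list and index-based per-kind buckets by sort-then-scan: sort the kind labels, multiply (run length + 1) for each maximal run of equal labels in one linear sweep, and subtract 1
import Mathlib
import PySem

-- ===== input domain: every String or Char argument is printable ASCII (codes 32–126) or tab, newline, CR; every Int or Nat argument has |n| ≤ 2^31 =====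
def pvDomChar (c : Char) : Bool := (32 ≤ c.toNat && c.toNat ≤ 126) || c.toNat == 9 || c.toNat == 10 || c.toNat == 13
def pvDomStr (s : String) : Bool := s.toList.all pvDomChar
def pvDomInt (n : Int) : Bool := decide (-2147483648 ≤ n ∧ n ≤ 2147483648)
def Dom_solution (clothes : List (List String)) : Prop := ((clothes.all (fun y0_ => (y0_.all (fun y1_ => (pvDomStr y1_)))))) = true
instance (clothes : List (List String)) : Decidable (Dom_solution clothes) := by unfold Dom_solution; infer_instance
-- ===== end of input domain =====

-- B replaces A's membership-scan kind list and index-based buckets by sort-then-scan: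
-- sort the kind labels and multiply (run length + 1) per maximal run in one sweep (alternative algorithm).

-- ===== PORT A =====
-- reduce(lambda x, y: x * y, arr); reduce raises on [], but A only calls it on nonempty lists
def pvMultiply (arr : List Int) : Int :=
  match arr with
  | [] => 0
  | x :: xs => xs.foldl (· * ·) x

def solution (clothes : List (List String)) : Int :=
  let kind : List String :=
    (PySem.List.pyRange 0 (clothes.length : Int) 1).foldl
      (fun kind v =>
        let t := PySem.List.pyGetD (PySem.List.pyGetD clothes v []) 1 ""
        if t ∈ kind then kind else kind ++ [t]) []
  let clothesList : List (List String) :=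
    (PySem.List.pyRange 0 (clothes.length : Int) 1).foldl
      (fun cl z =>
        let c := PySem.List.pyGetD clothes z []
        let t := PySem.List.pyGetD c 1 ""
        if t ∈ kind then
          cl.modify ((PySem.List.index? kind t).getD 0) (fun g => g ++ [PySem.List.pyGetD c 0 ""])
        else cl)
      ((PySem.List.pyRange 0 (kind.length : Int) 1).map (fun _ => ([] : List String)))
  if clothesList.length > 1 then
    let sizeList : List Int :=
      (PySem.List.pyRange 0 (clothesList.length : Int) 1).foldl
        (fun s h => s ++ [((PySem.List.pyGetD clothesList h []).length : Int) + 1]) []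
    pvMultiply sizeList - 1
  else
    (clothes.length : Int)

-- ===== PORT B =====
-- state of B's loop: (answer, run, prev); prev = none is Python's initial None
def pvStep (st : Int × Int × Option String) (k : String) : Int × Int × Option String :=
  if some k = st.2.2 then (st.1, st.2.1 + 1, st.2.2)
  else (st.1 * (st.2.1 + 1), 1, some k)

def solution_alt (clothes : List (List String)) : Int :=
  let kinds : List String :=
    PySem.List.sorted (clothes.map (fun item => PySem.List.pyGetD item 1 "")) (fun x => x) false
  let st := kinds.foldl pvStep (1, 0, none)
  st.1 * (st.2.1 + 1) - 1

-- ===== PRECONDITION & SPEC =====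
-- Pre_ excludes exactly the inputs where A (and B) raise IndexError: an inner list with fewer than 2 entries.
def Pre_solution (clothes : List (List String)) : Prop := ∀ item ∈ clothes, 2 ≤ item.length
instance (clothes : List (List String)) : Decidable (Pre_solution clothes) := by unfold Pre_solution; infer_instance
def pvWitness_solution : List (List String) :=
  [["yellow hat", "headgear"], ["blue sunglasses", "eyewear"], ["green turban", "headgear"]]

def Spec_solution (clothes : List (List String)) (out : Int) : Prop := out = solution_alt clothes
instance (clothes : List (List String)) (out : Int) : Decidable (Spec_solution clothes out) := by unfold Spec_solution; infer_instance

-- ===== CLAIM (what is proved, stated in full; the proofs are below) =====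
def Claim_equal_solution : Prop := ∀ (clothes : List (List String)), Dom_solution clothes → Pre_solution clothes → Spec_solution clothes (solution clothes)

-- ===== LEMMAS AND PROOFS =====

def pvKey (c : List String) : String := PySem.List.pyGetD c 1 ""

theorem foldl_mul (l : List Int) (a : Int) : l.foldl (· * ·) a = a * l.prod := by
  induction l generalizing a with
  | nil => simp
  | cons x xs ih => simp [List.foldl_cons, ih, mul_assoc]

theorem kind_fold (cs : List (List String)) :
    cs.foldl (fun kind c => if PySem.List.pyGetD c 1 "" ∈ kind then kind else kind ++ [PySem.List.pyGetD c 1 ""]) ([] : List String)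
      = PySem.Set.ofList (cs.map pvKey) := by
  rw [PySem.Set.ofList_eq_foldl, List.foldl_map]
  refine (PySem.List.foldl_congr_mem' _ _ _ _ ?_)
  intro c _ acc
  by_cases h : pvKey c ∈ acc <;> simp [PySem.Set.add, pvKey, PySem.Set.contains]

theorem grp_length (idx : List String → ℕ) (nm : List String → String) :
    ∀ (cs cl : List (List String)),
      (cs.foldl (fun cl c => cl.modify (idx c) (fun g => g ++ [nm c])) cl).length = cl.length := by
  intro cs
  induction cs with
  | nil => intro cl; rfl
  | cons c cs ih => intro cl; rw [List.foldl_cons, ih, List.length_modify]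

theorem grp_getElem (idx : List String → ℕ) (nm : List String → String) :
    ∀ (cs cl : List (List String)) (j : ℕ),
      ((cs.foldl (fun cl c => cl.modify (idx c) (fun g => g ++ [nm c])) cl)[j]?).map List.length
        = (cl[j]?).map (fun g => g.length + cs.countP (fun c => idx c == j)) := by
  intro cs
  induction cs with
  | nil => intro cl j; cases h : cl[j]? <;> simp [h]
  | cons c cs ih =>
    intro cl j
    rw [List.foldl_cons, ih, List.getElem?_modify]
    cases h : cl[j]? with
    | none => simp
    | some g =>
      by_cases hc : idx c = j <;> simp [hc] <;> omega

theorem initRep (n : ℕ) :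
    (PySem.List.pyRange 0 (n : Int) 1).map (fun _ => ([] : List String)) = List.replicate n ([] : List String) := by
  rw [PySem.List.pyRange_one]
  simp [Function.comp_def, List.map_const']

theorem countP_idx (kind : List String) (hnd : kind.Nodup) (j : ℕ) (hj : j < kind.length)
    (ks : List String) (hsub : ∀ t ∈ ks, t ∈ kind) :
    ks.countP (fun t => (PySem.List.index? kind t).getD 0 == j) = ks.count kind[j] := by
  rw [List.count]
  apply List.countP_congr
  intro t ht
  obtain ⟨i, hi⟩ := Option.isSome_iff_exists.mp ((PySem.List.index?_isSome_iff kind t).mpr (hsub t ht))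
  obtain ⟨hk, hval, _⟩ := PySem.List.getElem_of_index?_eq_some hi
  rw [hi]
  simp only [Option.getD_some, beq_iff_eq]
  constructor
  · rintro rfl; exact hval.symm
  · intro h; exact hnd.getElem_inj_iff.mp (by rw [hval, h])

theorem pvMultiply_eq_prod (l : List Int) (h : l ≠ []) : pvMultiply l = l.prod := by
  cases l with
  | nil => exact absurd rfl h
  | cons x xs => simp [pvMultiply, foldl_mul, List.prod_cons]

theorem sizes (CL : List (List String)) :
    (PySem.List.pyRange 0 (CL.length : Int) 1).foldl
      (fun s h => s ++ [((PySem.List.pyGetD CL h []).length : Int) + 1]) []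
      = CL.map (fun c => ((c.length : Int) + 1)) := by
  rw [PySem.List.foldl_pyRange_zero_pyGetD' CL []
      (fun (s : List Int) (c : List String) => s ++ [((c.length : Int) + 1)]) []]
  exact PySem.List.foldl_append_singleton_eq_map _ _ _

theorem CLmap (clothes : List (List String)) :
    (List.foldl (fun cl c => cl.modify
        ((PySem.List.index? (PySem.Set.ofList (clothes.map pvKey)) (PySem.List.pyGetD c 1 "")).getD 0)
        (fun g => g ++ [PySem.List.pyGetD c 0 ""]))
      (List.replicate (PySem.Set.ofList (clothes.map pvKey)).length []) clothes).map
        (fun c => ((c.length : Int) + 1))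
      = (PySem.Set.ofList (clothes.map pvKey)).map
          (fun k => (((clothes.map pvKey).count k : Int) + 1)) := by
  have hnd := PySem.Set.nodup_ofList (clothes.map pvKey)
  have hlen := grp_length
      (fun c => (PySem.List.index? (PySem.Set.ofList (clothes.map pvKey)) (PySem.List.pyGetD c 1 "")).getD 0)
      (fun c => PySem.List.pyGetD c 0 "") clothes
      (List.replicate (PySem.Set.ofList (clothes.map pvKey)).length [])
  apply List.ext_getElem?
  intro j
  rw [List.getElem?_map, List.getElem?_map]
  by_cases hj : j < (PySem.Set.ofList (clothes.map pvKey)).length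
  · have hget := grp_getElem
        (fun c => (PySem.List.index? (PySem.Set.ofList (clothes.map pvKey)) (PySem.List.pyGetD c 1 "")).getD 0)
        (fun c => PySem.List.pyGetD c 0 "") clothes
        (List.replicate (PySem.Set.ofList (clothes.map pvKey)).length []) j
    rw [List.getElem?_replicate, if_pos hj] at hget
    have hcomp : ∀ (o : Option (List String)),
        o.map (fun c => ((c.length : Int) + 1)) = (o.map List.length).map (fun L => ((L : Int) + 1)) := by
      intro o; cases o <;> rfl
    rw [hcomp, hget]
    have hcount : clothes.countP (fun c =>
          (PySem.List.index? (PySem.Set.ofList (clothes.map pvKey)) (PySem.List.pyGetD c 1 "")).getD 0 == j)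
        = (clothes.map pvKey).countP (fun t =>
          (PySem.List.index? (PySem.Set.ofList (clothes.map pvKey)) t).getD 0 == j) := by
      rw [List.countP_map]; rfl
    rw [Option.map_some, hcount,
        countP_idx _ hnd j hj _ (fun t ht => (PySem.Set.mem_ofList _ _).mpr ht),
        List.getElem?_eq_getElem hj, Option.map_some]
    simp
  · rw [List.getElem?_eq_none, List.getElem?_eq_none]
    · rfl
    · omega
    · rw [hlen, List.length_replicate]; omega

theorem altA (clothes : List (List String)) :
    solution clothes =
      (if 1 < (PySem.Set.ofList (clothes.map pvKey)).length then
        ((PySem.Set.ofList (clothes.map pvKey)).map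
          (fun k => (((clothes.map pvKey).count k : Int) + 1))).prod - 1
      else (clothes.length : Int)) := by
  unfold solution
  dsimp only
  rw [PySem.List.foldl_pyRange_zero_pyGetD' clothes []
      (fun kind c => if PySem.List.pyGetD c 1 "" ∈ kind then kind else kind ++ [PySem.List.pyGetD c 1 ""]) []]
  rw [kind_fold]
  have h2 := PySem.List.foldl_pyRange_zero_pyGetD' clothes []
      (fun cl c => if PySem.List.pyGetD c 1 "" ∈ PySem.Set.ofList (clothes.map pvKey) then
          cl.modify ((PySem.List.index? (PySem.Set.ofList (clothes.map pvKey)) (PySem.List.pyGetD c 1 "")).getD 0)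
            (fun g => g ++ [PySem.List.pyGetD c 0 ""])
        else cl)
      ((PySem.List.pyRange 0 ((PySem.Set.ofList (clothes.map pvKey)).length : Int) 1).map (fun _ => ([] : List String)))
  rw [h2]
  rw [PySem.List.foldl_congr_mem' clothes _
      (fun cl c => cl.modify ((PySem.List.index? (PySem.Set.ofList (clothes.map pvKey)) (PySem.List.pyGetD c 1 "")).getD 0)
        (fun g => g ++ [PySem.List.pyGetD c 0 ""])) _
      (by intro c hc acc
          have : PySem.List.pyGetD c 1 "" ∈ PySem.Set.ofList (clothes.map pvKey) :=
            (PySem.Set.mem_ofList _ _).mpr (List.mem_map_of_mem hc)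
          simp [this])]
  rw [initRep]
  rw [sizes]
  rw [grp_length (fun c => (PySem.List.index? (PySem.Set.ofList (clothes.map pvKey)) (PySem.List.pyGetD c 1 "")).getD 0)
      (fun c => PySem.List.pyGetD c 0 "") clothes (List.replicate (PySem.Set.ofList (clothes.map pvKey)).length [])]
  rw [List.length_replicate]
  rw [CLmap]
  by_cases hgt : 1 < (PySem.Set.ofList (clothes.map pvKey)).length
  · rw [if_pos hgt, if_pos hgt,
        pvMultiply_eq_prod _ (by
          intro hnil
          rw [List.map_eq_nil_iff] at hnil
          rw [hnil] at hgt
          simp at hgt)]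
  · rw [if_neg hgt, if_neg hgt]

-- the run-scan invariant: on a sorted tail whose elements all dominate prev = q,
-- the loop's final answer*(run+1) is (run + count q + 1) times the (count+1)-product of the other labels
theorem pvRunL (ks : List String) : ∀ (a r : Int) (q : String),
    ks.Pairwise (· ≤ ·) → (∀ x ∈ ks, q ≤ x) →
    (ks.foldl pvStep (a, r, some q)).1 * ((ks.foldl pvStep (a, r, some q)).2.1 + 1)
      = a * (r + (ks.count q : Int) + 1) * ∏ x ∈ ks.toFinset.erase q, ((ks.count x : Int) + 1) := by
  induction ks with
  | nil => intro a r q _ _; simp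
  | cons k ks ih =>
    intro a r q hpw hq
    have hk : ∀ x ∈ ks, k ≤ x := (List.pairwise_cons.mp hpw).1
    have hpw' := (List.pairwise_cons.mp hpw).2
    by_cases hkq : k = q
    · subst hkq
      rw [List.foldl_cons]
      have hstep : pvStep (a, r, some k) k = (a, r + 1, some k) := by simp [pvStep]
      rw [hstep, ih a (r + 1) k hpw' hk]
      rw [List.count_cons_self]
      have hfs : (k :: ks).toFinset.erase k = ks.toFinset.erase k := by
        simp [List.toFinset_cons, Finset.erase_insert_eq_erase]
      rw [hfs]
      have hprod : ∏ x ∈ ks.toFinset.erase k, (((k :: ks).count x : Int) + 1)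
          = ∏ x ∈ ks.toFinset.erase k, ((ks.count x : Int) + 1) := by
        refine Finset.prod_congr rfl ?_
        intro x hx
        have hne : x ≠ k := Finset.ne_of_mem_erase hx
        simp [hne.symm]
      rw [hprod]
      push_cast
      ring
    · have hqk : q ≤ k := hq k List.mem_cons_self
      have hqnotin : q ∉ k :: ks := by
        intro hmem
        rcases List.mem_cons.mp hmem with h | h
        · exact hkq h.symm
        · exact hkq (le_antisymm (hk q h) hqk)
      rw [List.foldl_cons]
      have hstep : pvStep (a, r, some q) k = (a * (r + 1), 1, some k) := by
        simp [pvStep, hkq]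
      rw [hstep, ih (a * (r + 1)) 1 k hpw' hk]
      have hcq : (k :: ks).count q = 0 := List.count_eq_zero.mpr hqnotin
      have hfs : (k :: ks).toFinset.erase q = (k :: ks).toFinset :=
        Finset.erase_eq_of_notMem (by simpa using hqnotin)
      rw [hcq, hfs, List.toFinset_cons]
      have hmem : k ∈ insert k ks.toFinset := Finset.mem_insert_self _ _
      rw [← Finset.mul_prod_erase _ _ hmem, Finset.erase_insert_eq_erase]
      rw [List.count_cons_self]
      have hprod : ∏ x ∈ ks.toFinset.erase k, (((k :: ks).count x : Int) + 1)
          = ∏ x ∈ ks.toFinset.erase k, ((ks.count x : Int) + 1) := by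
        refine Finset.prod_congr rfl ?_
        intro x hx
        have hne : x ≠ k := Finset.ne_of_mem_erase hx
        simp [hne.symm]
      rw [hprod]
      push_cast
      ring

theorem pvRunH (ks : List String) (hpw : ks.Pairwise (· ≤ ·)) :
    (ks.foldl pvStep (1, 0, none)).1 * ((ks.foldl pvStep (1, 0, none)).2.1 + 1)
      = ∏ x ∈ ks.toFinset, ((ks.count x : Int) + 1) := by
  cases ks with
  | nil => simp
  | cons k ks =>
    have hk : ∀ x ∈ ks, k ≤ x := (List.pairwise_cons.mp hpw).1
    have hpw' := (List.pairwise_cons.mp hpw).2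
    rw [List.foldl_cons]
    have hstep : pvStep (1, 0, none) k = (1, 1, some k) := by simp [pvStep]
    rw [hstep]
    have h1 : ((1 : Int), (1 : Int), some k) = ((1 : Int) * (0 + 1), 1, some k) := by norm_num
    rw [h1, pvRunL ks (1 * (0 + 1)) 1 k hpw' hk]
    rw [List.toFinset_cons]
    have hmem : k ∈ insert k ks.toFinset := Finset.mem_insert_self _ _
    rw [← Finset.mul_prod_erase _ _ hmem, Finset.erase_insert_eq_erase]
    rw [List.count_cons_self]
    have hprod : ∏ x ∈ ks.toFinset.erase k, (((k :: ks).count x : Int) + 1)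
        = ∏ x ∈ ks.toFinset.erase k, ((ks.count x : Int) + 1) := by
      refine Finset.prod_congr rfl ?_
      intro x hx
      have hne : x ≠ k := Finset.ne_of_mem_erase hx
      simp [hne.symm]
    rw [hprod]
    push_cast
    ring

theorem altB (clothes : List (List String)) :
    solution_alt clothes =
      ((PySem.Set.ofList (clothes.map pvKey)).map
        (fun k => (((clothes.map pvKey).count k : Int) + 1))).prod - 1 := by
  unfold solution_alt
  dsimp only
  have hkeys : clothes.map (fun item => PySem.List.pyGetD item 1 "") = clothes.map pvKey := rfl
  rw [hkeys]
  set keys := clothes.map pvKey with hkdef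
  set ks := PySem.List.sorted keys (fun x => x) false with hksdef
  have hpw : ks.Pairwise (· ≤ ·) := by
    have := PySem.List.sorted_pairwise keys (fun x => x)
    simpa using this
  have hperm : ks.Perm keys := PySem.List.sorted_perm keys (fun x => x) false
  rw [pvRunH ks hpw]
  have hfs : ks.toFinset = keys.toFinset := List.toFinset_eq_of_perm _ _ hperm
  have hcnt : ∀ x, ks.count x = keys.count x := fun x => hperm.count_eq x
  have hP : ∏ x ∈ ks.toFinset, ((ks.count x : Int) + 1)
      = ∏ x ∈ keys.toFinset, ((keys.count x : Int) + 1) := by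
    rw [hfs]
    exact Finset.prod_congr rfl (fun x _ => by rw [hcnt])
  rw [hP]
  have hfs2 : (PySem.Set.ofList keys).toFinset = keys.toFinset := by
    apply Finset.ext
    intro x
    simp [List.mem_toFinset, PySem.Set.mem_ofList]
  have := List.prod_toFinset (fun k => ((keys.count k : Int) + 1)) (PySem.Set.nodup_ofList keys)
  rw [hfs2] at this
  rw [← this]

theorem solution_eq_alt (clothes : List (List String)) : solution clothes = solution_alt clothes := by
  rw [altA, altB]
  by_cases hgt : 1 < (PySem.Set.ofList (clothes.map pvKey)).length
  · rw [if_pos hgt]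
  · rw [if_neg hgt]
    have h01 : (PySem.Set.ofList (clothes.map pvKey)).length = 0
        ∨ (PySem.Set.ofList (clothes.map pvKey)).length = 1 := by omega
    rcases h01 with h0 | h1
    · rw [List.length_eq_zero_iff] at h0
      have hks : clothes.map pvKey = [] := by
        cases hcl : clothes.map pvKey with
        | nil => rfl
        | cons t ts =>
          exfalso
          have : t ∈ PySem.Set.ofList (clothes.map pvKey) :=
            (PySem.Set.mem_ofList _ _).mpr (by rw [hcl]; exact List.mem_cons_self)
          rw [h0] at this
          exact absurd this (List.not_mem_nil)
      have : clothes = [] := List.map_eq_nil_iff.mp hks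
      subst this
      simp
    · obtain ⟨k, hk⟩ := List.length_eq_one_iff.mp h1
      rw [hk, List.map_singleton, List.prod_singleton]
      have hcnt : (clothes.map pvKey).count k = (clothes.map pvKey).length :=
        List.count_eq_length.mpr (by
          intro t ht
          have : t ∈ PySem.Set.ofList (clothes.map pvKey) := (PySem.Set.mem_ofList _ _).mpr ht
          rw [hk] at this
          exact (List.mem_singleton.mp this).symm)
      rw [hcnt, List.length_map]
      omega

-- ===== VERDICT (by name: the statement is the Claim_ definition above) =====
theorem solution_spec : Claim_equal_solution := by
  intro clothes _ _
  unfold Spec_solution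
  exact solution_eq_alt clothes
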